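-- pv_equiv track=rewrite | github.com/zuned11/advent-of-code-2023 | Day3/day3pt2.py | recurse_right
-- ===== SOURCE A (Python) =====
-- def recurse_right(line: str, index: int) -> str:
--     if index + 1 < len(line):
--         if line[index + 1].isnumeric():
--             return str(line[index]) + recurse_right(line, index + 1)
--         elif not line[index + 1].isnumeric():
--             if line[index].isnumeric():
--                 return line[index]
--             else:
--                 return ''
--     elif index == len(line) - 1:
--         return str(line[index])
-- ===== SOURCE B (Python) =====
-- def recurse_right(line: str, index: int) -> str:
--     result = ''
--     i = index
--     while i + 1 < len(line) and line[i + 1].isnumeric():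
--         result += line[i]
--         i += 1
--     if i + 1 < len(line):
--         return result + line[i] if line[i].isnumeric() else result
--     elif i == len(line) - 1:
--         return result + line[i]
--     else:
--         return None
-- ===== Notes on version B (the rewrite author's own statement) =====
-- stated objective: alternative
-- what changed: Replaces A's right-extending recursion (which rebuilds the suffix via repeated string concatenation on the way back up) with a single iterative while-loop that advances an index and accumulates the result string, with the three termination branches handled once after the loop.
import Mathlib
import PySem

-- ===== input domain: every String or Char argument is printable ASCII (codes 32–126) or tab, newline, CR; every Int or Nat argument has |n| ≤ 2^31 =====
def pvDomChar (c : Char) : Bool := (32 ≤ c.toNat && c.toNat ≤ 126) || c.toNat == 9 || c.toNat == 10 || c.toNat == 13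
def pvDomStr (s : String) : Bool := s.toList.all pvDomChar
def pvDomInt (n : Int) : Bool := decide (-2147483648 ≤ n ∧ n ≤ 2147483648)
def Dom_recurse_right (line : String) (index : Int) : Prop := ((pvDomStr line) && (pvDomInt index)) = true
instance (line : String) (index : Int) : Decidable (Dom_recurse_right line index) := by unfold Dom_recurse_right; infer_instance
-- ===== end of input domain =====

-- B replaces A's right-extending recursion by an iterative accumulator loop (different decomposition, same cost);
-- equivalence is about the RETURN value on inputs where A returns a string (see Pre_).

-- Python's one-char `.isnumeric()` on an optional character; exact on the ASCII domain, where
-- isnumeric and isdigit coincide. `none` corresponds to an out-of-range access (excluded by Pre_).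
def pyIsNum (o : Option Char) : Bool := (o.map PySem.Chars.isdigit).getD false

-- ===== PORT A =====
-- A's recursion on the code-point list; string concatenation `str(line[index]) + …` is list cons/append.
-- The branch where Python falls through and returns None (index ≥ len(line)) yields [] here; it is outside Pre_.
def rrA (cs : List Char) (index : Int) : List Char :=
  if h1 : index + 1 < (cs.length : Int) then
    if pyIsNum (PySem.List.pyGet? cs (index + 1)) then
      (PySem.List.pyGetD cs index ' ') :: rrA cs (index + 1)
    else if ¬ pyIsNum (PySem.List.pyGet? cs (index + 1)) then
      if pyIsNum (PySem.List.pyGet? cs index) then [PySem.List.pyGetD cs index ' '] else []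
    else []
  else if index = (cs.length : Int) - 1 then [PySem.List.pyGetD cs index ' ']
  else []
termination_by ((cs.length : Int) - index).toNat
decreasing_by omega

def recurse_right (line : String) (index : Int) : String := String.ofList (rrA line.toList index)

-- ===== PORT B =====
-- B's while-loop: accumulate result and advance i while line[i+1] is numeric.
def rrLoop (cs : List Char) (result : List Char) (i : Int) : List Char × Int :=
  if h : i + 1 < (cs.length : Int) ∧ pyIsNum (PySem.List.pyGet? cs (i + 1)) then
    rrLoop cs (result ++ [PySem.List.pyGetD cs i ' ']) (i + 1)
  else (result, i)
termination_by ((cs.length : Int) - i).toNat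
decreasing_by omega

-- After the loop, the three termination branches of Source B; the None branch yields [] (outside Pre_).
def rrB (cs : List Char) (index : Int) : List Char :=
  let p := rrLoop cs [] index
  if p.2 + 1 < (cs.length : Int) then
    if pyIsNum (PySem.List.pyGet? cs p.2) then p.1 ++ [PySem.List.pyGetD cs p.2 ' '] else p.1
  else if p.2 = (cs.length : Int) - 1 then p.1 ++ [PySem.List.pyGetD cs p.2 ' ']
  else []

def recurse_right_alt (line : String) (index : Int) : String := String.ofList (rrB line.toList index)

-- ===== PRECONDITION & SPEC =====
-- Exactly the inputs on which Python A returns a string: outside this set A either returns None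
-- (index ≥ len(line), or any index on the empty string) or raises IndexError (index < -len(line)).
def Pre_recurse_right (line : String) (index : Int) : Prop :=
  line.toList ≠ [] ∧ -(line.toList.length : Int) ≤ index ∧ index < (line.toList.length : Int)
instance (line : String) (index : Int) : Decidable (Pre_recurse_right line index) := by
  unfold Pre_recurse_right; infer_instance
def pvWitness_recurse_right : String × Int := ("a12", 1)

def Spec_recurse_right (line : String) (index : Int) (out : String) : Prop := out = recurse_right_alt line index
instance (line : String) (index : Int) (out : String) : Decidable (Spec_recurse_right line index out) := by unfold Spec_recurse_right; infer_instance

-- ===== CLAIM (what is proved, stated in full; the proofs are below) =====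
def Claim_equal_recurse_right : Prop := ∀ (line : String) (index : Int), Dom_recurse_right line index → Pre_recurse_right line index → Spec_recurse_right line index (recurse_right line index)

-- ===== LEMMAS AND PROOFS =====

-- One-step unfolding equations for the loop.
theorem rrLoop_step (cs r : List Char) (i : Int)
    (h : i + 1 < (cs.length : Int) ∧ pyIsNum (PySem.List.pyGet? cs (i + 1)) = true) :
    rrLoop cs r i = rrLoop cs (r ++ [PySem.List.pyGetD cs i ' ']) (i + 1) := by
  rw [rrLoop]; rw [dif_pos h]

theorem rrLoop_stop (cs r : List Char) (i : Int)
    (h : ¬ (i + 1 < (cs.length : Int) ∧ pyIsNum (PySem.List.pyGet? cs (i + 1)) = true)) :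
    rrLoop cs r i = (r, i) := by
  rw [rrLoop]; rw [dif_neg h]

-- The loop's accumulator distributes over a prefix.
theorem rrLoop_append (cs r₁ : List Char) :
    ∀ (n : Nat) (i : Int) (r₂ : List Char), ((cs.length : Int) - i).toNat = n →
      rrLoop cs (r₁ ++ r₂) i = (r₁ ++ (rrLoop cs r₂ i).1, (rrLoop cs r₂ i).2) := by
  intro n
  induction n using Nat.strong_induction_on with
  | _ n ih =>
    intro i r₂ hn
    by_cases h : i + 1 < (cs.length : Int) ∧ pyIsNum (PySem.List.pyGet? cs (i + 1)) = true
    · rw [rrLoop_step cs (r₁ ++ r₂) i h, rrLoop_step cs r₂ i h, List.append_assoc]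
      exact ih (((cs.length : Int) - (i + 1)).toNat) (by omega) (i + 1) _ rfl
    · rw [rrLoop_stop cs (r₁ ++ r₂) i h, rrLoop_stop cs r₂ i h]

-- The loop never moves i past the end of the string.
theorem rrLoop_lt (cs : List Char) :
    ∀ (n : Nat) (r : List Char) (i : Int), ((cs.length : Int) - i).toNat = n →
      i < (cs.length : Int) → (rrLoop cs r i).2 < (cs.length : Int) := by
  intro n
  induction n using Nat.strong_induction_on with
  | _ n ih =>
    intro r i hn hi
    by_cases h : i + 1 < (cs.length : Int) ∧ pyIsNum (PySem.List.pyGet? cs (i + 1)) = true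
    · rw [rrLoop_step cs r i h]
      exact ih (((cs.length : Int) - (i + 1)).toNat) (by omega) _ (i + 1) rfl (by omega)
    · rw [rrLoop_stop cs r i h]; exact hi

theorem rrA_eq_rrB (cs : List Char) (index : Int) : rrA cs index = rrB cs index := by
  generalize hn : ((cs.length : Int) - index).toNat = n
  induction n using Nat.strong_induction_on generalizing index with
  | _ n ih =>
    rw [rrA]
    by_cases h1 : index + 1 < (cs.length : Int)
    · rw [dif_pos h1]
      by_cases h2 : pyIsNum (PySem.List.pyGet? cs (index + 1)) = true
      · rw [if_pos h2]
        rw [ih (((cs.length : Int) - (index + 1)).toNat) (by omega) (index + 1) rfl]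
        simp only [rrB]
        rw [rrLoop_step cs [] index ⟨h1, h2⟩]
        have hap := rrLoop_append cs [PySem.List.pyGetD cs index ' ']
          (((cs.length : Int) - (index + 1)).toNat) (index + 1) [] rfl
        simp only [List.append_nil] at hap
        simp only [List.nil_append]
        rw [hap]
        have hlt : (rrLoop cs [] (index + 1)).2 < (cs.length : Int) :=
          rrLoop_lt cs (((cs.length : Int) - (index + 1)).toNat) [] (index + 1) rfl (by omega)
        by_cases hj : (rrLoop cs [] (index + 1)).2 + 1 < (cs.length : Int)
        · rw [if_pos hj, if_pos hj]
          by_cases hd : pyIsNum (PySem.List.pyGet? cs (rrLoop cs [] (index + 1)).2) = true <;>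
            simp [hd]
        · have hj2 : (rrLoop cs [] (index + 1)).2 = (cs.length : Int) - 1 := by omega
          rw [if_neg hj, if_neg hj, if_pos hj2, if_pos hj2]
          simp
      · rw [if_neg h2, if_pos h2]
        simp only [rrB]
        rw [rrLoop_stop cs [] index (by intro hc; exact h2 hc.2)]
        simp [h1]
    · rw [dif_neg h1]
      simp only [rrB]
      rw [rrLoop_stop cs [] index (by intro hc; exact h1 hc.1)]
      by_cases h3 : index = (cs.length : Int) - 1
      · rw [if_pos h3]
        simp [h3]
      · rw [if_neg h3]
        simp [h1, h3]

-- ===== VERDICT (by name: the statement is the Claim_ definition above) =====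
theorem recurse_right_spec : Claim_equal_recurse_right := by
  intro line index _ _
  unfold Spec_recurse_right recurse_right recurse_right_alt
  rw [rrA_eq_rrB]
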